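-- pv_equiv track=rewrite | github.com/eziong/algorithm | level1/3052.py | count_remainders
-- ===== SOURCE A (Python) =====
-- def count_remainders(n_list, Q):
--     ret = dict()
--     for n in n_list:
--         if ret.get(n%Q) is None:
--             ret[n%Q] = 0
--         else:
--             ret[n%Q] += 1
--     return len(ret.keys())
-- ===== SOURCE B (Python) =====
-- def count_remainders(n_list, Q):
--     # sort-then-scan: count runs in the sorted remainder list
--     rs = sorted(n % Q for n in n_list)
--     count = 0
--     prev = None
--     for r in rs:
--         if prev is None or r != prev:
--             count += 1
--             prev = r
--     return count
-- ===== Notes on version B (the rewrite author's own statement) =====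
-- stated objective: alternative
-- what changed: Replaces hash-dict deduplication with sort-then-adjacent-compare: sort the remainders and count 1 for each position whose value differs from its predecessor.
import Mathlib
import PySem

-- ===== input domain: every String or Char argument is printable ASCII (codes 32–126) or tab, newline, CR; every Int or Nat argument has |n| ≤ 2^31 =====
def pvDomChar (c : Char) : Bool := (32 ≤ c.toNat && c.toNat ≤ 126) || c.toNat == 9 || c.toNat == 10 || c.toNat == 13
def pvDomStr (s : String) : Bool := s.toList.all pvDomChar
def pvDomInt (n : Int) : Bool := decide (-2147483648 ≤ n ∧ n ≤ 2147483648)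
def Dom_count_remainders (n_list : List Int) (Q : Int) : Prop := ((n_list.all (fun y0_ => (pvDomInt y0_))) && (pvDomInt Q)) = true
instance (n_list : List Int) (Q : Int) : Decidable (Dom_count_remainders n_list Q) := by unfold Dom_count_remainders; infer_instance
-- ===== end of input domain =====

-- B replaces A's hash-dict deduplication by sort-then-adjacent-compare; alternative algorithm, same return value.


-- ===== PORT A =====
def count_remainders (n_list : List Int) (Q : Int) : Int :=
  let ret : PySem.Dict Int Int :=
    n_list.foldl (fun d n =>
      match d.get? (PySem.Int.mod n Q) with
      | none => d.insert (PySem.Int.mod n Q) 0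
      | some v => d.insert (PySem.Int.mod n Q) (v + 1)) PySem.Dict.empty
  (ret.keys.length : Int)

-- ===== PORT B =====
def count_remainders_alt (n_list : List Int) (Q : Int) : Int :=
  let rs := PySem.List.sorted (n_list.map (fun n => PySem.Int.mod n Q)) (fun x => x) false
  (rs.foldl (fun (st : Int × Option Int) r =>
      if st.2 = none ∨ some r ≠ st.2 then (st.1 + 1, some r) else st) ((0 : Int), (none : Option Int))).1

-- ===== PRECONDITION & SPEC =====
-- Pre_ excludes exactly the inputs where Python A raises ZeroDivisionError: Q = 0 with a non-empty list (B raises there too).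
def Pre_count_remainders (n_list : List Int) (Q : Int) : Prop := n_list = [] ∨ Q ≠ 0
instance (n_list : List Int) (Q : Int) : Decidable (Pre_count_remainders n_list Q) := by unfold Pre_count_remainders; infer_instance
def pvWitness_count_remainders : List Int × Int := ([3, 10, 17, 5], 7)
def Spec_count_remainders (n_list : List Int) (Q : Int) (out : Int) : Prop := out = count_remainders_alt n_list Q
instance (n_list : List Int) (Q : Int) (out : Int) : Decidable (Spec_count_remainders n_list Q out) := by unfold Spec_count_remainders; infer_instance

-- ===== CLAIM (what is proved, stated in full; the proofs are below) =====
def Claim_equal_count_remainders : Prop := ∀ (n_list : List Int) (Q : Int), Dom_count_remainders n_list Q → Pre_count_remainders n_list Q → Spec_count_remainders n_list Q (count_remainders n_list Q)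

-- ===== LEMMAS AND PROOFS =====

-- |insert r s| = 1 + |s.erase r| (both sides count s ∪ {r}).
lemma card_insert_eq_one_add_card_erase (r : Int) (s : Finset Int) :
    (insert r s).card = 1 + (s.erase r).card := by
  by_cases hr : r ∈ s
  · rw [Finset.insert_eq_self.mpr hr]
    have := Finset.card_erase_add_one hr
    omega
  · rw [Finset.card_insert_of_notMem hr, Finset.erase_eq_of_notMem hr]
    omega

-- A's dict keys are exactly the distinct remainders in first-occurrence order.
lemma countA_eq_card (n_list : List Int) (Q : Int) :
    count_remainders n_list Q = (((n_list.map (fun n => PySem.Int.mod n Q)).toFinset.card : Nat) : Int) := by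
  show ((n_list.foldl (fun (d : PySem.Dict Int Int) n =>
      match d.get? (PySem.Int.mod n Q) with
      | none => d.insert (PySem.Int.mod n Q) 0
      | some v => d.insert (PySem.Int.mod n Q) (v + 1)) PySem.Dict.empty).keys.length : Int) = _
  have hfun : (fun (d : PySem.Dict Int Int) n =>
      match d.get? (PySem.Int.mod n Q) with
      | none => d.insert (PySem.Int.mod n Q) 0
      | some v => d.insert (PySem.Int.mod n Q) (v + 1))
    = (fun (d : PySem.Dict Int Int) n => d.insert (PySem.Int.mod n Q)
        (match d.get? (PySem.Int.mod n Q) with | none => 0 | some v => v + 1)) := by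
    funext d n
    cases h : d.get? (PySem.Int.mod n Q) <;> simp
  rw [hfun, show ((n_list.foldl (fun (d : PySem.Dict Int Int) n => d.insert (PySem.Int.mod n Q)
        (match d.get? (PySem.Int.mod n Q) with | none => 0 | some v => v + 1)) PySem.Dict.empty).keys)
      = PySem.Set.ofList (n_list.map (fun n => PySem.Int.mod n Q)) by
    rw [PySem.Dict.keys_foldl_insert_key]
    simp [PySem.Dict.keys_empty, PySem.Set.update_nil_left]]
  have hnd := PySem.Set.nodup_ofList (xs := n_list.map (fun n => PySem.Int.mod n Q))
  have hfs : (PySem.Set.ofList (n_list.map (fun n => PySem.Int.mod n Q))).toFinset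
      = (n_list.map (fun n => PySem.Int.mod n Q)).toFinset := by
    ext y; simp [PySem.Set.mem_ofList]
  rw [← hfs, List.toFinset_card_of_nodup hnd]

-- B's scan with prev = some p over a sorted list all ≥ p counts the distinct values other than p.
lemma scan_sorted_count (s : List Int) (p : Int) (c : Int)
    (hs : s.Pairwise (· ≤ ·)) (hp : ∀ x ∈ s, p ≤ x) :
    (s.foldl (fun (st : Int × Option Int) r =>
        if st.2 = none ∨ some r ≠ st.2 then (st.1 + 1, some r) else st) (c, some p)).1
      = c + ((s.toFinset.erase p).card : Int) := by
  induction s generalizing p c with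
  | nil => simp
  | cons r t ih =>
    have hPt : t.Pairwise (· ≤ ·) := hs.tail
    have hrt : ∀ x ∈ t, r ≤ x := fun x hx => (List.pairwise_cons.mp hs).1 x hx
    rw [List.foldl_cons]
    by_cases hrp : r = p
    · subst hrp
      have hstep : (if ((c, some r) : Int × Option Int).2 = none ∨ some r ≠ (c, some r).2
          then (c + 1, some r) else (c, some r)) = (c, some r) := by simp
      rw [hstep, ih r c hPt hrt]
      have : (r :: t).toFinset.erase r = t.toFinset.erase r := by
        simp [List.toFinset_cons, Finset.erase_insert_eq_erase]
      rw [this]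
    · have hstep : (if ((c, some p) : Int × Option Int).2 = none ∨ some r ≠ (c, some p).2
          then (c + 1, some r) else (c, some p)) = (c + 1, some r) := by simp [hrp]
      rw [hstep, ih r (c + 1) hPt hrt]
      have hpr : p < r := lt_of_le_of_ne (hp r (by simp)) (Ne.symm hrp)
      have hpnotint : p ∉ t := fun hmem => absurd (hrt p hmem) (by omega)
      have hcard : ((r :: t).toFinset.erase p).card = 1 + (t.toFinset.erase r).card := by
        have h1 : (r :: t).toFinset.erase p = (r :: t).toFinset := by
          apply Finset.erase_eq_of_notMem
          simp [hpnotint]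
          omega
        rw [h1, List.toFinset_cons, card_insert_eq_one_add_card_erase]
      rw [hcard]; push_cast; ring

-- B's scan over the sorted remainder list counts the distinct remainders.
lemma countB_eq_card (n_list : List Int) (Q : Int) :
    count_remainders_alt n_list Q = (((n_list.map (fun n => PySem.Int.mod n Q)).toFinset.card : Nat) : Int) := by
  show (((PySem.List.sorted (n_list.map (fun n => PySem.Int.mod n Q)) (fun x => x) false).foldl
      (fun (st : Int × Option Int) r =>
        if st.2 = none ∨ some r ≠ st.2 then (st.1 + 1, some r) else st)
      ((0 : Int), (none : Option Int))).1) = _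
  have hperm := PySem.List.sorted_perm (xs := n_list.map (fun n => PySem.Int.mod n Q))
      (key := fun x => x) (rev := false)
  have hfs : (PySem.List.sorted (n_list.map (fun n => PySem.Int.mod n Q)) (fun x => x) false).toFinset
      = (n_list.map (fun n => PySem.Int.mod n Q)).toFinset := List.toFinset_eq_of_perm _ _ hperm
  have hpw : (PySem.List.sorted (n_list.map (fun n => PySem.Int.mod n Q)) (fun x => x) false).Pairwise (· ≤ ·) := by
    have := PySem.List.sorted_pairwise (xs := n_list.map (fun n => PySem.Int.mod n Q)) (key := fun x => x)
    exact this
  rw [← hfs]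
  cases hrs : PySem.List.sorted (n_list.map (fun n => PySem.Int.mod n Q)) (fun x => x) false with
  | nil => simp
  | cons r t =>
    rw [hrs] at hpw
    have hstep : (if ((0 : Int), (none : Option Int)).2 = none ∨ some r ≠ ((0 : Int), (none : Option Int)).2
        then ((0 : Int) + 1, some r) else ((0 : Int), (none : Option Int))) = (1, some r) := by simp
    rw [List.foldl_cons, hstep,
      scan_sorted_count t r 1 hpw.tail (fun x hx => (List.pairwise_cons.mp hpw).1 x hx),
      List.toFinset_cons, card_insert_eq_one_add_card_erase]
    push_cast; ring

-- ===== VERDICT (by name: the statement is the Claim_ definition above) =====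
theorem count_remainders_spec : Claim_equal_count_remainders := by
  intro n_list Q _ _
  unfold Spec_count_remainders
  rw [countA_eq_card, countB_eq_card]
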